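-- pv_equiv track=rewrite | github.com/odoo/odoo | venv/Lib/site-packages/reportlab/lib/utils.py | yieldNoneSplits
-- ===== SOURCE A (Python) =====
-- def yieldNoneSplits(L):
--     '''yield sublists of L separated by None; the Nones disappear'''
--     i = 0
--     n = len(L)
--     while i<n:
--         try:
--             j = L.index(None,i)
--             yield L[i:j]
--             i = j+1
--             if not L: break
--         except ValueError:
--             yield L[i:]
--             break
-- ===== SOURCE B (Python) =====
-- def yieldNoneSplits(L):
--     '''yield sublists of L separated by None; the Nones disappear'''
--     current = []
--     for x in L:
--         if x is None:
--             yield current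
--             current = []
--         else:
--             current.append(x)
--     if current:
--         yield current
-- ===== Notes on version B (the rewrite author's own statement) =====
-- stated objective: simpler
-- what changed: Replaced the index/while loop with .index(None,i) searches, slicing and try/except control flow by a single element-wise pass accumulating the current segment and yielding it at each None (final segment only if non-empty).
import Mathlib
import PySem

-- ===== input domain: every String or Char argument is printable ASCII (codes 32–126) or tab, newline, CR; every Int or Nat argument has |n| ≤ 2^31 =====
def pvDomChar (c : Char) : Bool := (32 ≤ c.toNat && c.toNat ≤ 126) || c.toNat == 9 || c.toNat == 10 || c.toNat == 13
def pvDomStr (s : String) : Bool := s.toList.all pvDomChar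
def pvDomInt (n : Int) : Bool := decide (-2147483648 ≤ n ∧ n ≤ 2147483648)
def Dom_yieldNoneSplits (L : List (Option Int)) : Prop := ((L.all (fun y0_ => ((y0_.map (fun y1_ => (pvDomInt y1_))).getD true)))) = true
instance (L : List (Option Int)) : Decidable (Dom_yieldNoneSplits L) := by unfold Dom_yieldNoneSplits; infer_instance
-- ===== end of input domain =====

-- B replaces A's .index(None,i)-search/slice/try-except loop by one element-wise pass with an accumulator; simpler, same O(n) cost.

-- ===== PORT A =====
-- L.index(None, i): first index ≥ i holding none (ValueError → none)
def idxNoneFrom (L : List (Option Int)) (i : Nat) : Option Nat :=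
  match PySem.List.index? (L.drop i) none with
  | some m => some (i + m)
  | none => none

theorem idxNoneFrom_ge {L : List (Option Int)} {i j : Nat}
    (h : idxNoneFrom L i = some j) : i ≤ j := by
  unfold idxNoneFrom at h
  rw [PySem.List.index?_eq_idxOf?] at h
  cases hm : List.idxOf? (none : Option Int) (L.drop i) with
  | none => rw [hm] at h; exact absurd h (by simp)
  | some m => rw [hm] at h; simp at h; omega

-- the while-loop of A, state i
def yieldNoneSplitsGo (L : List (Option Int)) (i : Nat) : List (List (Option Int)) :=
  if _h : i < L.length then
    match hj : idxNoneFrom L i with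
    | some j => PySem.List.slice L (some (i : Int)) (some (j : Int)) :: yieldNoneSplitsGo L (j + 1)
    | none => [PySem.List.slice L (some (i : Int)) none]
  else []
termination_by L.length - i
decreasing_by
  have := idxNoneFrom_ge hj; omega

def yieldNoneSplits (L : List (Option Int)) : List (List (Option Int)) :=
  yieldNoneSplitsGo L 0

-- ===== PORT B =====
-- B's for-loop, state: the accumulated current segment
def altGo : List (Option Int) → List (Option Int) → List (List (Option Int))
  | [], cur => if cur.isEmpty then [] else [cur]
  | none :: xs, _cur => _cur :: altGo xs []
  | some v :: xs, cur => altGo xs (cur ++ [some v])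

def yieldNoneSplits_alt (L : List (Option Int)) : List (List (Option Int)) :=
  altGo L []

-- ===== PRECONDITION & SPEC =====
def Spec_yieldNoneSplits (L : List (Option Int)) (out : List (List (Option Int))) : Prop := out = yieldNoneSplits_alt L
instance (L : List (Option Int)) (out : List (List (Option Int))) : Decidable (Spec_yieldNoneSplits L out) := by unfold Spec_yieldNoneSplits; infer_instance

-- ===== CLAIM (what is proved, stated in full; the proofs are below) =====
def Claim_equal_yieldNoneSplits : Prop := ∀ (L : List (Option Int)), Dom_yieldNoneSplits L → Spec_yieldNoneSplits L (yieldNoneSplits L)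

-- ===== LEMMAS AND PROOFS =====

theorem altGo_no_none (s cur : List (Option Int)) (h : (none : Option Int) ∉ s) :
    altGo s cur = if (cur ++ s).isEmpty then [] else [cur ++ s] := by
  induction s generalizing cur with
  | nil => simp [altGo]
  | cons x xs ih =>
    cases x with
    | none => simp at h
    | some v =>
      have hx : (none : Option Int) ∉ xs := fun hm => h (List.mem_cons_of_mem _ hm)
      simp [altGo, ih _ hx, List.isEmpty_iff]

theorem altGo_pre_none (pre suf cur : List (Option Int)) (h : (none : Option Int) ∉ pre) :
    altGo (pre ++ none :: suf) cur = (cur ++ pre) :: altGo suf [] := by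
  induction pre generalizing cur with
  | nil => simp [altGo]
  | cons x xs ih =>
    cases x with
    | none => simp at h
    | some v =>
      have hx : (none : Option Int) ∉ xs := fun hm => h (List.mem_cons_of_mem _ hm)
      simp [altGo, ih _ hx]

theorem go_eq (L : List (Option Int)) (i : Nat) :
    yieldNoneSplitsGo L i = altGo (L.drop i) [] := by
  induction hn : L.length - i using Nat.strong_induction_on generalizing i with
  | _ n ih =>
  rw [yieldNoneSplitsGo]
  by_cases h : i < L.length
  · simp only [h, dif_pos]
    cases hm : PySem.List.index? (L.drop i) (none : Option Int) with
    | some m =>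
      have hj : idxNoneFrom L i = some (i + m) := by unfold idxNoneFrom; rw [hm]
      rw [hj]
      show PySem.List.slice L (some (i : Int)) (some ((i + m : Nat) : Int)) ::
          yieldNoneSplitsGo L (i + m + 1) = altGo (L.drop i) []
      obtain ⟨pre, suf, hs, hlen, hnp⟩ := (PySem.List.index?_eq_some_iff _ _ _).1 hm
      have hslice : PySem.List.slice L (some (i : Int)) (some ((i + m : Nat) : Int)) = pre := by
        have := PySem.List.slice_natCast L i (i + m)
        push_cast at this ⊢
        rw [this, hs, ← hlen]
        simp
      have hdrop : L.drop (i + m + 1) = suf := by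
        have : L.drop (i + m + 1) = (L.drop i).drop (m + 1) := by
          rw [List.drop_drop]; ring_nf
        rw [this, hs, ← hlen]
        simp [List.drop_append]
      have hrec : yieldNoneSplitsGo L (i + m + 1) = altGo (L.drop (i + m + 1)) [] := by
        apply ih (L.length - (i + m + 1)) _ _ rfl
        omega
      rw [hslice, hrec, hdrop, hs, altGo_pre_none pre suf [] hnp]
      simp
    | none =>
      have hj : idxNoneFrom L i = none := by unfold idxNoneFrom; rw [hm]
      rw [hj]
      show [PySem.List.slice L (some (i : Int)) none] = altGo (L.drop i) []
      have hnn : (none : Option Int) ∉ L.drop i := (PySem.List.index?_eq_none_iff _ _).1 hm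
      rw [PySem.List.slice_from_natCast, altGo_no_none _ [] hnn]
      have : ¬ (L.drop i).isEmpty := by
        simp [List.isEmpty_iff, List.drop_eq_nil_iff]; omega
      simp [this]
  · simp only [h, dif_neg, not_false_iff]
    rw [List.drop_of_length_le (by omega)]
    simp [altGo]

-- ===== VERDICT (by name: the statement is the Claim_ definition above) =====
theorem yieldNoneSplits_spec : Claim_equal_yieldNoneSplits := by
  intro L _ 
  unfold Spec_yieldNoneSplits yieldNoneSplits yieldNoneSplits_alt
  exact go_eq L 0
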